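-- pv_equiv track=rewrite | github.com/houmy555809/cpp-cross-validation | lib/main.py | num_different_blocks
-- ===== SOURCE A (Python) =====
-- def num_different_blocks(data):
--     last = None
--     cnt = 0
--     for i in data:
--         if i == "same":
--             continue
--         if i != last or i == "both":
--             cnt += 1
--             last = i
--     return cnt
-- ===== SOURCE B (Python) =====
-- def num_different_blocks(data):
--     f = [x for x in data if x != "same"]
--
--     def count(lo, hi):
--         # number of counted blocks in f[lo:hi] (each 'both' counts individually)
--         n = hi - lo
--         if n == 0:
--             return 0
--         if n == 1:
--             return 1
--         mid = lo + n // 2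
--         c = count(lo, mid) + count(mid, hi)
--         if f[mid - 1] == f[mid] and f[mid] != "both":
--             c -= 1  # a run of equal non-'both' elements spans the split: merge
--         return c
--
--     return count(0, len(f))
-- ===== Notes on version B (the rewrite author's own statement) =====
-- stated objective: alternative
-- what changed: Replaces A's single-pass last-sentinel state machine with a divide-and-conquer: filter out 'same', recursively count halves, and subtract 1 at each split where an equal non-'both' run spans the boundary.
import Mathlib
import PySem

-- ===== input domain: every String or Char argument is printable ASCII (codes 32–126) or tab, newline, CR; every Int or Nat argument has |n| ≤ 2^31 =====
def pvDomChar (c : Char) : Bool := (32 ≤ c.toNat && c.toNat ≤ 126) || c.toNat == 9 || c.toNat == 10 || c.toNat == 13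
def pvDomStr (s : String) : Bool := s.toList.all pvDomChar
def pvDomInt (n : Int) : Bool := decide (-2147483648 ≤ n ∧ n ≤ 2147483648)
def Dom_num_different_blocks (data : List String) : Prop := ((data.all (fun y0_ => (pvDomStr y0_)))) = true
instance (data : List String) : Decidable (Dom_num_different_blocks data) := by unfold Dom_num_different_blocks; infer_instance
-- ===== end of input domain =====

-- ===== PORT A =====
-- B replaces A's last-sentinel linear state machine by filter + divide-and-conquer with a boundary merge correction; return values proved equal.
-- literal port of A: fold over data carrying (last : Option String, cnt)
def num_different_blocks (data : List String) : Int :=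
  (data.foldl (fun (st : Option String × Int) i =>
      if i = "same" then st
      else if st.1 ≠ some i ∨ i = "both" then (some i, st.2 + 1)
      else st) (none, 0)).2

-- ===== PORT B =====
-- port of B's recursive count over the half-open segment: the segment f[lo:hi] is the list
-- argument; f[mid-1] / f[mid] are the last element of the left half / head of the right half
def pvCount (l : List String) : Int :=
  match l with
  | [] => 0
  | [_] => 1
  | x :: y :: rest =>
    let full := x :: y :: rest
    let m := full.length / 2
    pvCount (full.take m) + pvCount (full.drop m)
      - (if (full.take m).getLast? = (full.drop m).head? ∧ (full.drop m).head? ≠ some "both"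
          then 1 else 0)
termination_by l.length
decreasing_by
  · simp only [List.length_take, List.length_cons]; omega
  · simp only [List.length_drop, List.length_cons]; omega

def num_different_blocks_alt (data : List String) : Int :=
  pvCount (data.filter (fun i => i != "same"))

-- ===== PRECONDITION & SPEC =====
def Spec_num_different_blocks (data : List String) (out : Int) : Prop := out = num_different_blocks_alt data
instance (data : List String) (out : Int) : Decidable (Spec_num_different_blocks data out) := by unfold Spec_num_different_blocks; infer_instance

-- ===== CLAIM (what is proved, stated in full; the proofs are below) =====
def Claim_equal_num_different_blocks : Prop := ∀ (data : List String), Dom_num_different_blocks data → Spec_num_different_blocks data (num_different_blocks data)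

-- ===== LEMMAS AND PROOFS =====

-- abstract counter corresponding to A's state machine on the filtered list
def pvG (last : Option String) (l : List String) : Int :=
  match l with
  | [] => 0
  | y :: ys => if last ≠ some y ∨ y = "both" then 1 + pvG (some y) ys else pvG last ys

-- A's fold skips "same" entries, so it equals the fold over the filtered list
lemma foldA_filter (data : List String) (st : Option String × Int) :
    data.foldl (fun (st : Option String × Int) i =>
      if i = "same" then st
      else if st.1 ≠ some i ∨ i = "both" then (some i, st.2 + 1)
      else st) st
    = (data.filter (fun i => i != "same")).foldl (fun (st : Option String × Int) i =>
      if i = "same" then st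
      else if st.1 ≠ some i ∨ i = "both" then (some i, st.2 + 1)
      else st) st := by
  induction data generalizing st with
  | nil => rfl
  | cons x xs ih =>
    by_cases h : x = "same" <;>
      simp [h, List.foldl_cons, ih]

-- on a "same"-free list, A's fold counts cnt + pvG last
lemma foldA_pvG (l : List String) (hl : "same" ∉ l) (last : Option String) (cnt : Int) :
    (l.foldl (fun (st : Option String × Int) i =>
      if i = "same" then st
      else if st.1 ≠ some i ∨ i = "both" then (some i, st.2 + 1)
      else st) (last, cnt)).2 = cnt + pvG last l := by
  induction l generalizing last cnt with
  | nil => simp [pvG]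
  | cons y ys ih =>
    have hy : y ≠ "same" := fun h => hl (h ▸ List.mem_cons_self)
    have hys : "same" ∉ ys := fun h => hl (List.mem_cons_of_mem _ h)
    by_cases hb : last ≠ some y ∨ y = "both" <;>
      simp [List.foldl_cons, hy, hb, pvG, ih hys] <;> ring

-- splitting: the state after a nonempty prefix is 'some' of its last element
lemma pvG_append (l1 l2 : List String) (h : l1 ≠ []) (last : Option String) :
    pvG last (l1 ++ l2) = pvG last l1 + pvG (some (l1.getLast h)) l2 := by
  induction l1 generalizing last with
  | nil => exact absurd rfl h
  | cons y ys ih =>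
    by_cases hys : ys = []
    · subst hys
      by_cases hb : last ≠ some y ∨ y = "both"
      · simp [pvG, hb, List.getLast]
      · rcases not_or.mp hb with ⟨h1, h2⟩
        simp [pvG, List.getLast, not_not.mp h1, h2]
    · have hlast : (y :: ys).getLast (by simp) = ys.getLast hys := by
        simp [List.getLast_cons hys]
      by_cases hb : last ≠ some y ∨ y = "both"
      · simp [pvG, hb, hlast, ih hys]; ring
      · rcases not_or.mp hb with ⟨h1, h2⟩
        simp [pvG, hlast, ih hys, not_not.mp h1, h2]

-- restarting the state on a nonempty list costs the boundary correction
lemma pvG_some (a y : String) (ys : List String) :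
    pvG (some a) (y :: ys)
      = pvG none (y :: ys) - (if a = y ∧ y ≠ "both" then 1 else 0) := by
  by_cases hay : a = y
  · subst hay
    by_cases hb : a = "both" <;> simp [pvG, hb]
  · have hcond : (some a ≠ some y ∨ y = "both") := Or.inl (by simp [hay])
    simp only [pvG, if_pos hcond, if_pos (Or.inl (by simp : (none : Option String) ≠ some y))]
    rw [if_neg (by tauto)]
    ring

-- B's divide-and-conquer count equals A's abstract counter
lemma pvCount_eq (l : List String) : pvCount l = pvG none l := by
  induction l using pvCount.induct with
  | case1 => simp [pvCount, pvG]
  | case2 x => simp [pvCount, pvG]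
  | case3 x y rest full m ih1 ih2 =>
    rw [pvCount]
    simp only [full, m] at *
    set full := x :: y :: rest with hfull
    set m := full.length / 2 with hm
    have hmlb : 1 ≤ m := by simp [hm, hfull]; omega
    have hmub : m < full.length := by simp [hm, hfull]; omega
    have htake_ne : full.take m ≠ [] := by
      simp [List.take_eq_nil_iff]; omega
    have hdrop_ne : full.drop m ≠ [] := by
      simp [List.drop_eq_nil_iff]; omega
    obtain ⟨h, t, hht⟩ := List.exists_cons_of_ne_nil hdrop_ne
    have hsplit : full = full.take m ++ full.drop m := (List.take_append_drop m full).symm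
    rw [ih1, ih2]
    conv_rhs => rw [hsplit]
    rw [pvG_append _ _ htake_ne, hht]
    rw [pvG_some]
    have hgl : (full.take m).getLast? = some ((full.take m).getLast htake_ne) :=
      List.getLast?_eq_some_getLast htake_ne
    rw [hgl]
    simp only [List.head?_cons, Option.some.injEq, ne_eq]
    split_ifs <;> ring

-- ===== VERDICT (by name: the statement is the Claim_ definition above) =====
theorem num_different_blocks_spec : Claim_equal_num_different_blocks := by
  intro data _
  unfold Spec_num_different_blocks num_different_blocks num_different_blocks_alt
  rw [foldA_filter, foldA_pvG _ (by simp), pvCount_eq]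
  simp
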